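-- pv_equiv track=rewrite | github.com/kimpro82/MyPractice | Python/Extract3Bits.py | extract_3_bit_values
-- ===== SOURCE A (Python) =====
-- def extract_3_bit_values(data):
--     """
--     Extracts 3-bit values from the given byte data.
--
--     Args:
--         data (list of int): The byte data to extract 3-bit values from.
--
--     Returns:
--         list of int: The extracted 3-bit values.
--     """
--     bit_list = []
--     for byte in data:
--         for bit_position in range(8):
--             bit_list.append((byte >> (7 - bit_position)) & 1)  # Extract individual bits
--
--     # Extract 3-bit values
--     pixel_list = []
--     for index in range(0, len(bit_list), 3):
--         if index + 2 < len(bit_list):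
--             pixel_value = (bit_list[index] << 2) | (bit_list[index + 1] << 1) | bit_list[index + 2]
--             pixel_list.append(pixel_value)
--     return pixel_list
-- ===== SOURCE B (Python) =====
-- def extract_3_bit_values(data):
--     """
--     Extracts 3-bit values from the given byte data.
--
--     Single streaming pass: keep the pending (< 3) bits in a small integer
--     accumulator instead of materialising a per-bit list and regrouping it.
--     """
--     pixel_list = []
--     acc = 0
--     nbits = 0
--     for byte in data:
--         acc = (acc << 8) | (byte & 0xFF)
--         nbits += 8
--         while nbits >= 3:
--             nbits -= 3
--             pixel_list.append((acc >> nbits) & 7)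
--         acc &= (1 << nbits) - 1
--     return pixel_list
-- ===== Notes on version B (the rewrite author's own statement) =====
-- stated objective: faster
-- what changed: Instead of materialising the full per-bit list and then regrouping it with an index loop, B makes a single streaming pass over the bytes, keeping pending bits in an integer accumulator and emitting each 3-bit value as soon as 3 bits are available.
import Mathlib
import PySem

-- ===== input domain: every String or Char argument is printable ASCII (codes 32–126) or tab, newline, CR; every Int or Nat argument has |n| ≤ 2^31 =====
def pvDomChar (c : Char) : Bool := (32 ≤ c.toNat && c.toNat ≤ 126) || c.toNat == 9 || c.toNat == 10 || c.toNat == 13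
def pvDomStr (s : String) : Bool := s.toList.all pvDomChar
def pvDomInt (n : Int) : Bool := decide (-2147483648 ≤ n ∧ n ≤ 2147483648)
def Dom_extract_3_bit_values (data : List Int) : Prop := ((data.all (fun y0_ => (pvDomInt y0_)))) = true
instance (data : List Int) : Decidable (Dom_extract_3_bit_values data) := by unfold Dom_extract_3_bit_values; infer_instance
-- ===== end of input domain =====

-- B replaces A's materialised per-bit list + regrouping pass by a single streaming pass
-- over the bytes with an integer bit-accumulator (objective: alternative decomposition).

-- ===== PORT A =====
def extract_3_bit_values (data : List Int) : List Int :=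
  let bit_list := data.foldl (fun bl byte =>
    (PySem.List.pyRange 0 8 1).foldl
      (fun bl bit_position => bl ++ [PySem.Int.band (byte >>> (7 - bit_position).toNat) 1]) bl) []
  (PySem.List.pyRange 0 (bit_list.length : Int) 3).foldl (fun px index =>
    if index + 2 < (bit_list.length : Int) then
      px ++ [PySem.Int.bor (PySem.Int.bor ((PySem.List.pyGetD bit_list index 0) <<< (2 : Nat))
              ((PySem.List.pyGetD bit_list (index + 1) 0) <<< (1 : Nat)))
              (PySem.List.pyGetD bit_list (index + 2) 0)]
    else px) []

-- ===== PORT B =====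
-- the inner `while nbits >= 3` loop of Source B
def pvWhile (acc : Int) (nbits : Nat) (out : List Int) : Nat × List Int :=
  if 3 ≤ nbits then
    pvWhile acc (nbits - 3) (out ++ [PySem.Int.band (acc >>> (nbits - 3)) 7])
  else (nbits, out)
termination_by nbits
decreasing_by omega

-- the `for byte in data` loop of Source B, carrying (acc, nbits, pixel_list)
def pvLoop : List Int → Int → Nat → List Int → List Int
  | [], _, _, out => out
  | byte :: rest, acc, nbits, out =>
    let acc' := PySem.Int.bor (acc <<< (8 : Nat)) (PySem.Int.band byte 255)
    let p := pvWhile acc' (nbits + 8) out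
    pvLoop rest (PySem.Int.band acc' ((1 <<< p.1) - 1)) p.1 p.2

def extract_3_bit_values_alt (data : List Int) : List Int := pvLoop data 0 0 []

-- ===== PRECONDITION & SPEC =====
def Spec_extract_3_bit_values (data : List Int) (out : List Int) : Prop := out = extract_3_bit_values_alt data
instance (data : List Int) (out : List Int) : Decidable (Spec_extract_3_bit_values data out) := by unfold Spec_extract_3_bit_values; infer_instance

-- ===== CLAIM (what is proved, stated in full; the proofs are below) =====
def Claim_equal_extract_3_bit_values : Prop := ∀ (data : List Int), Dom_extract_3_bit_values data → Spec_extract_3_bit_values data (extract_3_bit_values data)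

-- ===== LEMMAS AND PROOFS =====

-- the 8 bits of a byte, most significant first (exactly the values A appends)
def bits8 (byte : Int) : List Int :=
  [PySem.Int.band (byte >>> (7 : Nat)) 1, PySem.Int.band (byte >>> (6 : Nat)) 1,
   PySem.Int.band (byte >>> (5 : Nat)) 1, PySem.Int.band (byte >>> (4 : Nat)) 1,
   PySem.Int.band (byte >>> (3 : Nat)) 1, PySem.Int.band (byte >>> (2 : Nat)) 1,
   PySem.Int.band (byte >>> (1 : Nat)) 1, PySem.Int.band (byte >>> (0 : Nat)) 1]

-- regroup a bit list into 3-bit values, dropping a trailing incomplete group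
def groups : List Int → List Int
  | a :: b :: c :: t =>
      PySem.Int.bor (PySem.Int.bor (a <<< (2 : Nat)) (b <<< (1 : Nat))) c :: groups t
  | _ => []

-- the low m bits of an integer, most significant first
def lowbits (a : Int) : Nat → List Int
  | 0 => []
  | k + 1 => PySem.Int.band (a >>> k) 1 :: lowbits a k

theorem band7 (a : Int) : PySem.Int.band a 7 = a % 8 := by
  unfold PySem.Int.band
  norm_num
  have hm : ∀ x : Nat, x &&& 7 = x % 8 := fun x => by
    have := Nat.and_two_pow_sub_one_eq_mod x 3
    norm_num at this
    exact this
  split_ifs with h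
  · rw [show Int.toNat 7 = 7 from rfl, hm]
    omega
  · rw [show Int.toNat 7 = 7 from rfl, Nat.and_comm, hm]
    omega

theorem band255 (a : Int) : PySem.Int.band a 255 = a % 256 := by
  unfold PySem.Int.band
  norm_num
  have hm : ∀ x : Nat, x &&& 255 = x % 256 := fun x => by
    have := Nat.and_two_pow_sub_one_eq_mod x 8
    norm_num at this
    exact this
  split_ifs with h
  · rw [show Int.toNat 255 = 255 from rfl, hm]
    omega
  · rw [show Int.toNat 255 = 255 from rfl, Nat.and_comm, hm]
    omega

theorem band3 (a : Int) : PySem.Int.band a 3 = a % 4 := by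
  unfold PySem.Int.band
  norm_num
  have hm : ∀ x : Nat, x &&& 3 = x % 4 := fun x => by
    have := Nat.and_two_pow_sub_one_eq_mod x 2
    norm_num at this
    exact this
  split_ifs with h
  · rw [show Int.toNat 3 = 3 from rfl, hm]
    omega
  · rw [show Int.toNat 3 = 3 from rfl, Nat.and_comm, hm]
    omega

theorem bitg (x : Int) (j : Nat) :
    PySem.Int.band (x >>> j) 1 = x / 2 ^ j % 2 := by
  rw [PySem.Int.band_one, PySem.Int.mod_eq_emod_of_pos (by norm_num), Int.shiftRight_eq_div_pow]
  push_cast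
  ring_nf

-- a 3-bit group read at once equals the three bits reassembled (the value A builds)
theorem band7_decomp (a : Int) (k : Nat) :
    PySem.Int.band (a >>> k) 7 =
      PySem.Int.bor (PySem.Int.bor ((PySem.Int.band (a >>> (k + 2)) 1) <<< (2 : Nat))
        ((PySem.Int.band (a >>> (k + 1)) 1) <<< (1 : Nat))) (PySem.Int.band (a >>> k) 1) := by
  have e1 : a / 2 ^ (k + 1) = a / 2 ^ k / 2 := by
    rw [Int.ediv_ediv_of_nonneg (by positivity), ← pow_succ]
  have e2 : a / 2 ^ (k + 2) = a / 2 ^ k / 4 := by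
    rw [Int.ediv_ediv_of_nonneg (by positivity)]
    congr 1
    ring
  rw [bitg, bitg, bitg, band7, Int.shiftRight_eq_div_pow]
  push_cast
  rw [e1, e2]
  set x := a / 2 ^ k with hx
  rcases Int.emod_two_eq (x / 4) with h2 | h2 <;> rcases Int.emod_two_eq (x / 2) with h1 | h1 <;>
    rcases Int.emod_two_eq x with h0 | h0 <;>
    rw [h2, h1, h0] <;> norm_num [PySem.Int.bor, Int.shiftLeft_eq] <;> (try simp) <;> omega

theorem length_lowbits (a : Int) (m : Nat) : (lowbits a m).length = m := by
  induction m with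
  | zero => rfl
  | succ k ih => simp [lowbits, ih]

-- masking off the already-consumed bits does not change the pending low bits
theorem lowbits_mask (x : Int) (nb : Nat) (h : nb < 3) :
    lowbits (PySem.Int.band x ((1 <<< nb) - 1)) nb = lowbits x nb := by
  have hun1 : ∀ y : Int, lowbits y 1 = [PySem.Int.band (y >>> (0 : Nat)) 1] := fun y => rfl
  have hun2 : ∀ y : Int, lowbits y 2
      = [PySem.Int.band (y >>> (1 : Nat)) 1, PySem.Int.band (y >>> (0 : Nat)) 1] := fun y => rfl
  interval_cases nb
  · rfl
  · rw [show ((((1 <<< (1:Nat) : Nat)) : Int)) - 1 = 1 by norm_num [Nat.shiftLeft_eq], PySem.Int.band_one,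
      PySem.Int.mod_eq_emod_of_pos (by norm_num), hun1, hun1]
    simp only [bitg]
    norm_num
  · rw [show ((((1 <<< (2:Nat) : Nat)) : Int)) - 1 = 3 by norm_num [Nat.shiftLeft_eq], band3, hun2, hun2]
    simp only [bitg, List.cons.injEq]
    norm_num
    omega

theorem groups_short (l : List Int) (h : l.length < 3) : groups l = [] := by
  match l, h with
  | [], _ => rfl
  | [_], _ => rfl
  | [_, _], _ => rfl

theorem groups_append : ∀ (L T : List Int),
    groups (L ++ T) = groups L ++ groups (L.drop (L.length - L.length % 3) ++ T)
  | [], T => by simp [groups]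
  | [a], T => by simp [groups]
  | [a, b], T => by simp [groups]
  | a :: b :: c :: t, T => by
    have ih := groups_append t T
    have h3 : (a :: b :: c :: t).length - (a :: b :: c :: t).length % 3
        = (t.length - t.length % 3) + 3 := by simp; omega
    rw [h3, show (a :: b :: c :: t) ++ T = a :: b :: c :: (t ++ T) from rfl,
      show groups (a :: b :: c :: (t ++ T))
        = PySem.Int.bor (PySem.Int.bor (a <<< (2 : Nat)) (b <<< (1 : Nat))) c :: groups (t ++ T) from rfl,
      show groups (a :: b :: c :: t)
        = PySem.Int.bor (PySem.Int.bor (a <<< (2 : Nat)) (b <<< (1 : Nat))) c :: groups t from rfl,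
      show ((a :: b :: c :: t).drop ((t.length - t.length % 3) + 3)) = t.drop (t.length - t.length % 3) from rfl,
      ih]
    simp

theorem lowbits_drop (a : Int) : ∀ (m k : Nat), k ≤ m →
    (lowbits a m).drop (m - k) = lowbits a k := by
  intro m
  induction m with
  | zero => intro k hk; interval_cases k; rfl
  | succ n ih =>
    intro k hk
    by_cases hkn : k = n + 1
    · subst hkn; simp
    · have hk' : k ≤ n := by omega
      have : n + 1 - k = (n - k) + 1 := by omega
      rw [this, show lowbits a (n + 1) = PySem.Int.band (a >>> n) 1 :: lowbits a n from rfl,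
        List.drop_succ_cons, ih k hk']

-- pushing one byte into the accumulator appends its 8 bits to the pending bits
theorem acc'_eq (acc byte : Int) (h : 0 ≤ acc) :
    PySem.Int.bor (acc <<< (8 : Nat)) (PySem.Int.band byte 255) = 256 * acc + byte % 256 := by
  rw [band255, Int.shiftLeft_eq]
  have hr : 0 ≤ byte % 256 := by omega
  have hl : 0 ≤ acc * 2 ^ 8 := by positivity
  rw [PySem.Int.bor_of_nonneg hl hr]
  have h1 : (acc * 2 ^ 8).toNat = 2 ^ 8 * acc.toNat := by
    norm_num
    omega
  have h2 : (byte % 256).toNat < 2 ^ 8 := by omega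
  rw [h1, ← Nat.two_pow_add_eq_or_of_lt h2]
  push_cast
  omega

theorem lowbits_step (acc byte : Int) (h : 0 ≤ acc) (m : Nat) :
    lowbits (PySem.Int.bor (acc <<< (8 : Nat)) (PySem.Int.band byte 255)) (m + 8) =
      lowbits acc m ++ bits8 byte := by
  rw [acc'_eq acc byte h]
  have g2 : ∀ j : Nat, PySem.Int.band ((256 * acc + byte % 256) >>> (j + 8)) 1
      = PySem.Int.band (acc >>> j) 1 := fun j => by
    rw [bitg, bitg]
    have h1 : (2 : Int) ^ (j + 8) = 256 * 2 ^ j := by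
      rw [pow_add]
      ring
    rw [h1, ← Int.ediv_ediv_of_nonneg (by norm_num : (0 : Int) ≤ 256)]
    have h2 : (256 * acc + byte % 256) / 256 = acc := by omega
    rw [h2]
  induction m with
  | zero =>
    rw [show lowbits (256 * acc + byte % 256) (0 + 8) =
      [PySem.Int.band ((256 * acc + byte % 256) >>> (7 : Nat)) 1,
       PySem.Int.band ((256 * acc + byte % 256) >>> (6 : Nat)) 1,
       PySem.Int.band ((256 * acc + byte % 256) >>> (5 : Nat)) 1,
       PySem.Int.band ((256 * acc + byte % 256) >>> (4 : Nat)) 1,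
       PySem.Int.band ((256 * acc + byte % 256) >>> (3 : Nat)) 1,
       PySem.Int.band ((256 * acc + byte % 256) >>> (2 : Nat)) 1,
       PySem.Int.band ((256 * acc + byte % 256) >>> (1 : Nat)) 1,
       PySem.Int.band ((256 * acc + byte % 256) >>> (0 : Nat)) 1] from rfl]
    simp only [bits8, bitg, lowbits, List.nil_append, List.cons.injEq, and_true]
    norm_num
    omega
  | succ n ih =>
    rw [show lowbits (256 * acc + byte % 256) (n + 1 + 8)
        = PySem.Int.band ((256 * acc + byte % 256) >>> (n + 8)) 1
          :: lowbits (256 * acc + byte % 256) (n + 8) from rfl,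
      g2 n, ih,
      show lowbits acc (n + 1) = PySem.Int.band (acc >>> n) 1 :: lowbits acc n from rfl,
      List.cons_append]

-- the while loop drains the accumulator down to m % 3 bits, emitting the 3-bit groups
theorem whileW : ∀ (m : Nat) (acc : Int) (out : List Int),
    pvWhile acc m out = (m % 3, out ++ groups (lowbits acc m)) := by
  intro m
  induction m using Nat.strong_induction_on with
  | _ m ih =>
    intro acc out
    rw [pvWhile]
    split_ifs with h3
    · rw [ih (m - 3) (by omega)]
      have hm : m = (m - 3) + 3 := by omega
      refine Prod.ext ?_ ?_
      · simp
        omega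
      · simp only
        conv_rhs => rw [hm]
        rw [show lowbits acc ((m - 3) + 3)
            = PySem.Int.band (acc >>> ((m - 3) + 2)) 1
              :: PySem.Int.band (acc >>> ((m - 3) + 1)) 1
              :: PySem.Int.band (acc >>> (m - 3)) 1
              :: lowbits acc (m - 3) from rfl,
          show ∀ x y z t, groups (x :: y :: z :: t)
            = PySem.Int.bor (PySem.Int.bor (x <<< (2 : Nat)) (y <<< (1 : Nat))) z :: groups t
            from fun _ _ _ _ => rfl,
          ← band7_decomp]
        simp
    · have hm : m < 3 := by omega
      interval_cases m <;> simp [lowbits, groups]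

theorem loopB : ∀ (data : List Int) (acc : Int) (nbits : Nat) (out : List Int),
    0 ≤ acc → nbits < 3 →
    pvLoop data acc nbits out = out ++ groups (lowbits acc nbits ++ data.flatMap bits8) := by
  intro data
  induction data with
  | nil =>
    intro acc nbits out _ hn
    rw [pvLoop]
    rw [List.flatMap_nil, List.append_nil,
      groups_short _ (by rw [length_lowbits]; omega), List.append_nil]
  | cons byte rest ih =>
    intro acc nbits out hacc hn
    rw [pvLoop]
    simp only [whileW]
    have hacc' : 0 ≤ PySem.Int.bor (acc <<< (8 : Nat)) (PySem.Int.band byte 255) := by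
      rw [acc'_eq acc byte hacc]
      omega
    have hacc'' : 0 ≤ PySem.Int.band (PySem.Int.bor (acc <<< (8 : Nat)) (PySem.Int.band byte 255))
        ((1 <<< ((nbits + 8) % 3)) - 1) :=
      PySem.Int.band_nonneg_of_nonneg_left _ hacc'
    rw [ih _ _ _ hacc'' (by omega),
      lowbits_mask (PySem.Int.bor (acc <<< (8 : Nat)) (PySem.Int.band byte 255)) ((nbits + 8) % 3) (by omega)]
    rw [List.flatMap_cons, ← List.append_assoc, ← lowbits_step acc byte hacc nbits]
    set A' := PySem.Int.bor (acc <<< (8 : Nat)) (PySem.Int.band byte 255) with hA'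
    rw [← lowbits_drop A' (nbits + 8) ((nbits + 8) % 3) (by omega)]
    conv_rhs => rw [groups_append (lowbits A' (nbits + 8)) (rest.flatMap bits8)]
    rw [length_lowbits, List.append_assoc]

theorem B_eq (data : List Int) :
    extract_3_bit_values_alt data = groups (data.flatMap bits8) := by
  rw [extract_3_bit_values_alt, loopB data 0 0 [] le_rfl (by omega)]
  rfl

-- ===== A-side lemmas =====
theorem innerA (byte : Int) (bl : List Int) :
    (PySem.List.pyRange 0 8 1).foldl
      (fun bl bit_position =>
        bl ++ [PySem.Int.band (@HShiftRight.hShiftRight Int Nat Int Int.instHShiftRightNat byte (7 - bit_position).toNat) 1]) bl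
    = bl ++ bits8 byte := by
  rw [show PySem.List.pyRange 0 8 1 = [0, 1, 2, 3, 4, 5, 6, 7] from by decide]
  simp only [List.foldl, show ((7 : Int) - 0).toNat = 7 from rfl, show ((7 : Int) - 1).toNat = 6 from rfl,
    show ((7 : Int) - 2).toNat = 5 from rfl, show ((7 : Int) - 3).toNat = 4 from rfl,
    show ((7 : Int) - 4).toNat = 3 from rfl, show ((7 : Int) - 5).toNat = 2 from rfl,
    show ((7 : Int) - 6).toNat = 1 from rfl, show ((7 : Int) - 7).toNat = 0 from rfl, bits8,
    List.append_assoc, List.cons_append, List.nil_append]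

theorem range3 (n : Nat) :
    PySem.List.pyRange 0 (n : Int) 3 = (List.range ((n + 2) / 3)).map (fun k => ((3 * k : Nat) : Int)) := by
  rw [PySem.List.pyRange_of_pos _ _ (by norm_num)]
  have hc : (if (0 : Int) < (n : Int) then (((n : Int) - 0 + 3 - 1) / 3).toNat else 0) = (n + 2) / 3 := by
    split_ifs with h <;> omega
  rw [hc]
  apply List.map_congr_left
  intro k _
  push_cast
  ring

theorem getD3 (a b c : Int) (t : List Int) (n : Nat) :
    (a :: b :: c :: t).getD (n + 3) (0 : Int) = t.getD n 0 := by
  rw [show n + 3 = (n + 2) + 1 from rfl, List.getD_cons_succ,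
      show n + 2 = (n + 1) + 1 from rfl, List.getD_cons_succ, List.getD_cons_succ]

-- the regrouping index loop of A computes `groups`
theorem loopA : ∀ (bl acc : List Int),
    (List.range ((bl.length + 2) / 3)).foldl (fun px k =>
      if ((3 * k : Nat) : Int) + 2 < (bl.length : Int) then
        px ++ [PySem.Int.bor (PySem.Int.bor ((PySem.List.pyGetD bl ((3 * k : Nat) : Int) 0) <<< (2 : Nat))
                ((PySem.List.pyGetD bl (((3 * k : Nat) : Int) + 1) 0) <<< (1 : Nat)))
                (PySem.List.pyGetD bl (((3 * k : Nat) : Int) + 2) 0)]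
      else px) acc
    = acc ++ groups bl
  | [], acc => by simp [groups]
  | [a], acc => by norm_num [groups, List.range_one]
  | [a, b], acc => by norm_num [groups, List.range_one]
  | a :: b :: c :: t, acc => by
    have ih := loopA t
    simp only [List.length_cons]
    rw [show (t.length + 1 + 1 + 1 + 2) / 3 = ((t.length + 2) / 3) + 1 by omega,
      List.range_succ_eq_map, List.foldl_cons, List.foldl_map]
    have hcong : ∀ (pxx : List Int), ∀ k ∈ List.range ((t.length + 2) / 3),
        (fun x y =>
          if ((3 * y.succ : Nat) : Int) + 2 < ((t.length + 1 + 1 + 1 : Nat) : Int) then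
            x ++ [PySem.Int.bor (PySem.Int.bor ((PySem.List.pyGetD (a :: b :: c :: t) ((3 * y.succ : Nat) : Int) 0) <<< (2 : Nat))
                    ((PySem.List.pyGetD (a :: b :: c :: t) (((3 * y.succ : Nat) : Int) + 1) 0) <<< (1 : Nat)))
                    (PySem.List.pyGetD (a :: b :: c :: t) (((3 * y.succ : Nat) : Int) + 2) 0)]
          else x) pxx k =
        (fun x y =>
          if ((3 * y : Nat) : Int) + 2 < (t.length : Int) then
            x ++ [PySem.Int.bor (PySem.Int.bor ((PySem.List.pyGetD t ((3 * y : Nat) : Int) 0) <<< (2 : Nat))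
                    ((PySem.List.pyGetD t (((3 * y : Nat) : Int) + 1) 0) <<< (1 : Nat)))
                    (PySem.List.pyGetD t (((3 * y : Nat) : Int) + 2) 0)]
          else x) pxx k := by
      intro pxx k hk
      simp only
      have e0 : ((3 * k.succ : Nat) : Int) = ((3 * k + 3 : Nat) : Int) := by push_cast; ring
      have e1 : ((3 * k.succ : Nat) : Int) + 1 = ((3 * k + 1 + 3 : Nat) : Int) := by push_cast; ring
      have e2 : ((3 * k.succ : Nat) : Int) + 2 = ((3 * k + 2 + 3 : Nat) : Int) := by push_cast; ring
      rw [e1, e2, e0, PySem.List.pyGetD_natCast, PySem.List.pyGetD_natCast, PySem.List.pyGetD_natCast,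
        getD3, getD3, getD3]
      by_cases hg : ((3 * k : Nat) : Int) + 2 < (t.length : Int)
      · rw [if_pos hg, if_pos (by push_cast at hg ⊢; omega)]
        rw [show (((3 * k : Nat) : Int) + 1) = ((3 * k + 1 : Nat) : Int) by push_cast; ring,
          show (((3 * k : Nat) : Int) + 2) = ((3 * k + 2 : Nat) : Int) by push_cast; ring,
          PySem.List.pyGetD_natCast, PySem.List.pyGetD_natCast, PySem.List.pyGetD_natCast]
      · rw [if_neg hg, if_neg (by push_cast at hg ⊢; omega)]
    refine Eq.trans (PySem.List.foldl_congr_mem (List.range ((t.length + 2) / 3)) _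
      (fun x y =>
          if ((3 * y : Nat) : Int) + 2 < (t.length : Int) then
            x ++ [PySem.Int.bor (PySem.Int.bor ((PySem.List.pyGetD t ((3 * y : Nat) : Int) 0) <<< (2 : Nat))
                    ((PySem.List.pyGetD t (((3 * y : Nat) : Int) + 1) 0) <<< (1 : Nat)))
                    (PySem.List.pyGetD t (((3 * y : Nat) : Int) + 2) 0)]
          else x) _ hcong) ?_
    rw [if_pos (by push_cast; omega)]
    rw [show ((3 * 0 : Nat) : Int) = ((0 : Nat) : Int) by norm_num]
    rw [show (((0 : Nat) : Int) + 1) = ((1 : Nat) : Int) by norm_num]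
    rw [show (((0 : Nat) : Int) + 2) = ((2 : Nat) : Int) by norm_num]
    rw [PySem.List.pyGetD_natCast, PySem.List.pyGetD_natCast, PySem.List.pyGetD_natCast]
    rw [ih]
    simp [groups]

theorem A_eq (data : List Int) :
    extract_3_bit_values data = groups (data.flatMap bits8) := by
  have hbl : data.foldl (fun bl byte =>
      (PySem.List.pyRange 0 8 1).foldl
        (fun bl bit_position => bl ++ [PySem.Int.band (byte >>> (7 - bit_position).toNat) 1]) bl) []
      = data.flatMap bits8 := by
    refine Eq.trans (PySem.List.foldl_congr_mem data _ (fun bl byte => bl ++ bits8 byte) []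
      (fun bl byte _ => innerA byte bl)) ?_
    exact (PySem.List.foldl_append_eq_flatMap _ _ _).trans (List.nil_append _)
  simp only [extract_3_bit_values]
  rw [hbl, range3, List.foldl_map]
  exact (loopA (data.flatMap bits8) []).trans (List.nil_append _)

-- ===== VERDICT (by name: the statement is the Claim_ definition above) =====
theorem extract_3_bit_values_spec : Claim_equal_extract_3_bit_values := by
  intro data _
  unfold Spec_extract_3_bit_values
  rw [A_eq, B_eq]
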